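-- pv_equiv track=rewrite | github.com/Sankhya-AI/Dhee | plugins/engram-memory/hooks/prompt_context.py | _derive_query
-- ===== SOURCE A (Python) =====
-- MAX_QUERY_CHARS = 120
--
-- def _derive_query(raw: str) -> str:
--     raw = raw.strip()
--     for i, ch in enumerate(raw):
--         if ch in ".!?" and i > 0:
--             candidate = raw[: i + 1].strip()
--             if candidate:
--                 return candidate[:MAX_QUERY_CHARS]
--     return raw[:MAX_QUERY_CHARS]
-- ===== SOURCE B (Python) =====
-- MAX_QUERY_CHARS = 120
--
-- def _derive_query(raw: str) -> str:
--     raw = raw.strip()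
--     hits = [i for i in (raw.find(c, 1) for c in ".!?") if i != -1]
--     if hits:
--         return raw[: min(hits) + 1].strip()[:MAX_QUERY_CHARS]
--     return raw[:MAX_QUERY_CHARS]
-- ===== Notes on version B (the rewrite author's own statement) =====
-- stated objective: faster
-- what changed: A scans the stripped string character by character in Python and short-circuits at the first sentence-ending punctuation mark with positive index; B instead calls str.find once per punctuation mark (start 1), drops the not-found results and takes the minimum position.
import Mathlib
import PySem

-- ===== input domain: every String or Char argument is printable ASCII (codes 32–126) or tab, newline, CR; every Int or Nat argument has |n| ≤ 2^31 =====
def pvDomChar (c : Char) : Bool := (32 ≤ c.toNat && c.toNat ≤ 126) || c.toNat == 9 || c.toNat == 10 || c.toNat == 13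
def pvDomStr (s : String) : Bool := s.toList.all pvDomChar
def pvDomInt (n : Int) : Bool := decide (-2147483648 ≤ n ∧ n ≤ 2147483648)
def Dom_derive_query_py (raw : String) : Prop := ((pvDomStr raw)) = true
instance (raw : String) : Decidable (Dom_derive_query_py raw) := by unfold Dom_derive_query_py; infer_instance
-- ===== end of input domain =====

-- B replaces A's per-character short-circuit scan with one str.find per punctuation mark followed by a minimum (objective: faster; a timing run measured B faster at the largest size).

-- ===== PORT A =====
def pvPunct : List Char := ['.', '!', '?']

def deriveA_go (s : List Char) : List (Int × Char) → Option (List Char)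
  | [] => none
  | (i, ch) :: rest =>
    if PySem.Chars.isIn [ch] pvPunct = true ∧ 0 < i then
      let candidate := PySem.Chars.strip (PySem.List.slice s none (some (i + 1)))
      if candidate ≠ [] then some (PySem.List.slice candidate none (some 120))
      else deriveA_go s rest
    else deriveA_go s rest

def derive_query_py (raw : String) : String :=
  let s := PySem.Chars.strip raw.toList
  match deriveA_go s (PySem.List.enumerate s) with
  | some r => String.ofList r
  | none => String.ofList (PySem.List.slice s none (some 120))

-- ===== PORT B =====
def derive_query_py_alt (raw : String) : String :=
  let s := PySem.Chars.strip raw.toList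
  let hits := (pvPunct.map (fun c => PySem.Chars.findFrom s [c] 1 none)).filter (fun i => decide (i ≠ -1))
  match PySem.List.min? hits (fun x => x) with
  | some i => String.ofList (PySem.List.slice (PySem.Chars.strip (PySem.List.slice s none (some (i + 1)))) none (some 120))
  | none => String.ofList (PySem.List.slice s none (some 120))

-- ===== PRECONDITION & SPEC =====
def Spec_derive_query_py (raw : String) (out : String) : Prop := out = derive_query_py_alt raw
instance (raw : String) (out : String) : Decidable (Spec_derive_query_py raw out) := by unfold Spec_derive_query_py; infer_instance

-- ===== CLAIM (what is proved, stated in full; the proofs are below) =====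
def Claim_equal_derive_query_py : Prop := ∀ (raw : String), Dom_derive_query_py raw → Spec_derive_query_py raw (derive_query_py raw)

-- ===== LEMMAS AND PROOFS =====

lemma singleton_prefix_iff (c : Char) (l : List Char) : [c] <+: l ↔ l.head? = some c := by
  constructor
  · rintro ⟨t, rfl⟩; rfl
  · cases l with
    | nil => intro h; simp at h
    | cons a t => intro h; simp at h; exact ⟨t, by simp [h]⟩

lemma singleton_infix_iff (c : Char) (l : List Char) : [c] <:+: l ↔ c ∈ l := by
  constructor
  · rintro ⟨p, q, rfl⟩; simp
  · intro h
    obtain ⟨p, q, rfl⟩ := List.append_of_mem h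
    exact ⟨p, q, by simp⟩

lemma isIn_punct_iff (c : Char) : PySem.Chars.isIn [c] pvPunct = true ↔ c ∈ pvPunct := by
  rw [PySem.Chars.isIn_iff_infix, singleton_infix_iff]

lemma dropWhile_head_false {α : Type} {p : α → Bool} :
    ∀ (l : List α) (c : α) (m : List α), l.dropWhile p = c :: m → p c = false := by
  intro l
  induction l with
  | nil => intro c m h; simp at h
  | cons a t ih =>
    intro c m h
    by_cases hp : p a = true
    · rw [List.dropWhile_cons_of_pos hp] at h; exact ih c m h
    · rw [List.dropWhile_cons_of_neg hp] at h
      cases h; simpa using hp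

lemma rstrip_prefix (m : List Char) : PySem.Chars.rstrip m <+: m := by
  have h : List.dropWhile PySem.Chars.isspace m.reverse <:+ m.reverse := List.dropWhile_suffix _
  have := List.reverse_prefix.mpr (by simpa using h)
  simpa [PySem.Chars.rstrip] using this

lemma strip_head_not_space (l : List Char) (c : Char) (rest : List Char)
    (h : PySem.Chars.strip l = c :: rest) : PySem.Chars.isspace c = false := by
  have hpre : PySem.Chars.rstrip (PySem.Chars.lstrip l) <+: PySem.Chars.lstrip l :=
    rstrip_prefix _
  rw [PySem.Chars.strip] at h
  rw [h] at hpre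
  obtain ⟨t, ht⟩ := hpre
  have : (PySem.Chars.lstrip l) = c :: (rest ++ t) := by simpa using ht.symm
  exact dropWhile_head_false l c _ (by simpa [PySem.Chars.lstrip] using this)

lemma strip_cons_ne_nil (c : Char) (l : List Char) (hc : PySem.Chars.isspace c = false) :
    PySem.Chars.strip (c :: l) ≠ [] := by
  intro h
  rw [PySem.Chars.strip, PySem.Chars.lstrip, List.dropWhile_cons_of_neg (by simp [hc])] at h
  rw [PySem.Chars.rstrip, List.reverse_eq_nil_iff, List.dropWhile_eq_nil_iff] at h
  have := h c (by simp)
  simp [hc] at this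

/-- A's loop over `enumerate t k` (k ≥ 1) finds the first punctuation char of `t`. -/
lemma goA (s : List Char) (s0 : Char) (tl : List Char) (hs : s = s0 :: tl)
    (h0 : PySem.Chars.isspace s0 = false) :
    ∀ (t : List Char) (k : Int), 1 ≤ k →
    deriveA_go s (PySem.List.enumerate t k)
      = (t.findIdx? (fun c => decide (c ∈ pvPunct))).map
          (fun (j : Nat) => PySem.List.slice
              (PySem.Chars.strip (PySem.List.slice s none (some (k + (j : Int) + 1)))) none (some 120)) := by
  intro t
  induction t with
  | nil => intro k hk; simp [PySem.List.enumerate_nil, deriveA_go]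
  | cons c t' ih =>
    intro k hk
    rw [PySem.List.enumerate_cons]
    by_cases hp : c ∈ pvPunct
    · have hguard : PySem.Chars.isIn [c] pvPunct = true ∧ 0 < k :=
        ⟨(isIn_punct_iff c).mpr hp, by omega⟩
      have hcand : PySem.Chars.strip (PySem.List.slice s none (some (k + 1))) ≠ [] := by
        rw [PySem.List.slice_to (hb := by omega)]
        have hkn : 1 ≤ (k + 1).toNat := by omega
        rw [hs]
        cases hn : (k + 1).toNat with
        | zero => omega
        | succ n =>
          rw [List.take_succ_cons]
          exact strip_cons_ne_nil s0 _ h0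
      simp only [deriveA_go, if_pos hguard, if_pos hcand]
      simp [List.findIdx?_cons, hp]
    · have hguard : ¬ (PySem.Chars.isIn [c] pvPunct = true ∧ 0 < k) := by
        intro h; exact hp ((isIn_punct_iff c).mp h.1)
      simp only [deriveA_go, if_neg hguard]
      rw [ih (k + 1) (by omega), List.findIdx?_cons]
      cases h : t'.findIdx? (fun c => decide (c ∈ pvPunct)) with
      | none => simp [hp]
      | some j =>
        simp only [hp, decide_false, Bool.false_eq_true, if_false, Option.map_some]
        congr 3
        push_cast
        ring

/-- find of a single char: -1 iff absent, else the least index of that char. -/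
lemma find_single_neg (tl : List Char) (c : Char) :
    PySem.Chars.find tl [c] = -1 ↔ c ∉ tl := by
  rw [PySem.Chars.find_eq_neg_one_iff, singleton_infix_iff]

lemma find_single_spec (tl : List Char) (c : Char) (h : c ∈ tl) :
    0 ≤ PySem.Chars.find tl [c] ∧
    tl[(PySem.Chars.find tl [c]).toNat]? = some c ∧
    ∀ i < (PySem.Chars.find tl [c]).toNat, tl[i]? ≠ some c := by
  have h0 : 0 ≤ PySem.Chars.find tl [c] := by
    rw [PySem.Chars.find_nonneg_iff, singleton_infix_iff]; exact h
  obtain ⟨h1, h2⟩ := PySem.Chars.find_spec (s := tl) (sub := [c]) h0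
  refine ⟨h0, ?_, ?_⟩
  · rw [singleton_prefix_iff, List.head?_drop] at h1; exact h1
  · intro i hi hc
    exact h2 i hi (by rw [singleton_prefix_iff, List.head?_drop]; exact hc)

lemma findFrom_cons_eq (s0 : Char) (tl : List Char) (c : Char) :
    PySem.Chars.findFrom (s0 :: tl) [c] 1 none
      = if PySem.Chars.find tl [c] = -1 then -1 else 1 + PySem.Chars.find tl [c] := by
  have h := PySem.Chars.findFrom_natCast (s0 :: tl) [c] 1 (by simp)
  simpa using h

lemma goB (s0 : Char) (tl : List Char) :
    PySem.List.min?
      ((pvPunct.map (fun c => PySem.Chars.findFrom (s0 :: tl) [c] 1 none)).filter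
        (fun i => decide (i ≠ -1))) (fun x => x)
      = (tl.findIdx? (fun c => decide (c ∈ pvPunct))).map (fun (j : Nat) => (1 : Int) + (j : Int)) := by
  cases h : tl.findIdx? (fun c => decide (c ∈ pvPunct)) with
  | none =>
    rw [Option.map_none, PySem.List.min?_eq_none_iff, List.filter_eq_nil_iff]
    intro a ha
    simp only [List.mem_map] at ha
    obtain ⟨c, hc, rfl⟩ := ha
    have hcn : c ∉ tl := by
      intro hmem
      have := (List.findIdx?_eq_none_iff.mp h) c hmem
      simp [hc] at this
    simp [findFrom_cons_eq, (find_single_neg tl c).mpr hcn]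
  | some j =>
    obtain ⟨hj, hpj, hlt⟩ := List.findIdx?_eq_some_iff_getElem.mp h
    have hc0p : tl[j] ∈ pvPunct := by simpa using hpj
    have hfind0 : PySem.Chars.find tl [tl[j]] = (j : Int) := by
      obtain ⟨h0, hget, hmin⟩ := find_single_spec tl tl[j] (List.getElem_mem hj)
      have hnlen : (PySem.Chars.find tl [tl[j]]).toNat < tl.length := by
        by_contra hge
        rw [List.getElem?_eq_none (by omega)] at hget
        simp at hget
      have hnv : tl[(PySem.Chars.find tl [tl[j]]).toNat] = tl[j] := by
        have := List.getElem?_eq_getElem hnlen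
        rw [this] at hget
        exact Option.some.inj hget
      have hnj : ¬ ((PySem.Chars.find tl [tl[j]]).toNat < j) := by
        intro hlt'
        have hp' : (decide (tl[(PySem.Chars.find tl [tl[j]]).toNat] ∈ pvPunct)) = true := by
          rw [hnv]; simpa using hpj
        exact (hlt _ hlt') hp'
      have hjn : ¬ (j < (PySem.Chars.find tl [tl[j]]).toNat) := by
        intro hlt'
        exact hmin j hlt' (List.getElem?_eq_getElem hj)
      omega
    have hf0 : PySem.Chars.findFrom (s0 :: tl) [tl[j]] 1 none = 1 + (j : Int) := by
      rw [findFrom_cons_eq, hfind0]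
      simp
    have hin : (1 + (j : Int)) ∈
        (pvPunct.map (fun c => PySem.Chars.findFrom (s0 :: tl) [c] 1 none)).filter
          (fun i => decide (i ≠ -1)) := by
      rw [List.mem_filter]
      refine ⟨List.mem_map.mpr ⟨tl[j], hc0p, hf0⟩, by simp; omega⟩
    have hlb : ∀ y ∈ (pvPunct.map (fun c => PySem.Chars.findFrom (s0 :: tl) [c] 1 none)).filter
        (fun i => decide (i ≠ -1)), (1 + (j : Int)) ≤ y := by
      intro y hy
      rw [List.mem_filter] at hy
      obtain ⟨hy1, hy2⟩ := hy
      obtain ⟨c, hcP, rfl⟩ := List.mem_map.mp hy1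
      rw [findFrom_cons_eq] at hy2 ⊢
      by_cases hneg : PySem.Chars.find tl [c] = -1
      · simp [hneg] at hy2
      · have hmem : c ∈ tl := by
          by_contra hnm
          exact hneg ((find_single_neg tl c).mpr hnm)
        obtain ⟨h0, hget, hmin⟩ := find_single_spec tl c hmem
        have hnlen : (PySem.Chars.find tl [c]).toNat < tl.length := by
          by_contra hge
          rw [List.getElem?_eq_none (by omega)] at hget
          simp at hget
        have hpn : (fun c => decide (c ∈ pvPunct)) tl[(PySem.Chars.find tl [c]).toNat] = true := by
          have := List.getElem?_eq_getElem hnlen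
          rw [this] at hget
          simp [Option.some.inj hget, hcP]
        have : ¬ ((PySem.Chars.find tl [c]).toNat < j) := by
          intro hlt'
          exact (hlt _ hlt') hpn
        rw [if_neg hneg]
        omega
    obtain ⟨m, hm⟩ : ∃ m, PySem.List.min?
        ((pvPunct.map (fun c => PySem.Chars.findFrom (s0 :: tl) [c] 1 none)).filter
          (fun i => decide (i ≠ -1))) (fun x => x) = some m := by
      cases hmin : PySem.List.min?
          ((pvPunct.map (fun c => PySem.Chars.findFrom (s0 :: tl) [c] 1 none)).filter
            (fun i => decide (i ≠ -1))) (fun x => x) with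
      | none =>
        rw [PySem.List.min?_eq_none_iff] at hmin
        rw [hmin] at hin
        exact absurd hin (List.not_mem_nil)
      | some m => exact ⟨m, rfl⟩
    have h1 : (1 + (j : Int)) ≤ m := hlb m (PySem.List.min?_mem hm)
    have h2 : m ≤ 1 + (j : Int) := PySem.List.min?_isMin hm _ hin
    rw [hm, Option.map_some]
    congr 1
    omega

lemma main_opt (s : List Char)
    (hhead : ∀ c rest, s = c :: rest → PySem.Chars.isspace c = false) :
    deriveA_go s (PySem.List.enumerate s)
      = (PySem.List.min?
          ((pvPunct.map (fun c => PySem.Chars.findFrom s [c] 1 none)).filter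
            (fun i => decide (i ≠ -1))) (fun x => x)).map
          (fun i => PySem.List.slice
              (PySem.Chars.strip (PySem.List.slice s none (some (i + 1)))) none (some 120)) := by
  cases s with
  | nil => decide
  | cons s0 tl =>
    have h0 : PySem.Chars.isspace s0 = false := hhead s0 tl rfl
    rw [PySem.List.enumerate_cons]
    have hguard : ¬ (PySem.Chars.isIn [s0] pvPunct = true ∧ 0 < (0 : Int)) := by
      rintro ⟨-, h⟩; omega
    simp only [deriveA_go, if_neg hguard]
    rw [goA (s0 :: tl) s0 tl rfl h0 tl (0 + 1) (by omega), goB s0 tl]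
    cases h : tl.findIdx? (fun c => decide (c ∈ pvPunct)) with
    | none => simp
    | some j =>
      simp only [Option.map_some]
      norm_num

-- ===== VERDICT (by name: the statement is the Claim_ definition above) =====
theorem derive_query_py_spec : Claim_equal_derive_query_py := by
  intro raw _
  simp only [Spec_derive_query_py, derive_query_py, derive_query_py_alt]
  have hhead : ∀ c rest, PySem.Chars.strip raw.toList = c :: rest →
      PySem.Chars.isspace c = false := fun c rest h => strip_head_not_space _ c rest h
  rw [main_opt _ hhead]
  cases h : PySem.List.min?
      ((pvPunct.map (fun c => PySem.Chars.findFrom (PySem.Chars.strip raw.toList) [c] 1 none)).filter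
        (fun i => decide (i ≠ -1))) (fun x => x) with
  | none => simp
  | some i => simp
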